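-- pv_equiv track=rewrite | github.com/seminss/algorithm-study | mingeun/Lv2/86971.py | solution
-- ===== SOURCE A (Python) =====
-- from collections import deque
--
-- def count_tower(matrix, start, n):
--     q = deque([start])
--     visited = [False] * (n+1)
--     visited[start] = True
--     cnt = 1
--     while q:
--         tower = q.popleft()
--         for ntower in matrix[tower]:
--             if not visited[ntower]:
--                 q.append(ntower)
--                 visited[ntower] = True
--                 cnt += 1
--     return cnt
--
-- def solution(n, wires):
--     matrix = [ [] for _ in range(n+1)]
--     for u, v in wires:
--         matrix[u].append(v)
--         matrix[v].append(u)
--     # 완전 탐색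
--     answer = 99999999
--     for u, v in wires:
--         del matrix[u][matrix[u].index(v)]
--         del matrix[v][matrix[v].index(u)]
--         answer = min(answer, abs(count_tower(matrix, u, n) - count_tower(matrix, v, n)))
--         matrix[u].append(v)
--         matrix[v].append(u)
--     return answer
-- ===== SOURCE B (Python) =====
-- def _comp(n, wires, skip, start):
--     # size of the connected component of `start` when wire `skip` is removed,
--     # by label propagation over the wire list (no queue, no adjacency structure)
--     reach = [False] * (n + 1)
--     reach[start] = True
--     cnt = 1
--     for _ in range(n + 1):
--         changed = False
--         for j in range(len(wires)):
--             if j != skip: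
--                 a, b = wires[j]
--                 if reach[a] and not reach[b]:
--                     reach[b] = True
--                     cnt += 1
--                     changed = True
--                 if reach[b] and not reach[a]:
--                     reach[a] = True
--                     cnt += 1
--                     changed = True
--         if not changed:
--             break
--     return cnt
--
-- def solution(n, wires):
--     best = 99999999
--     for i in range(len(wires)):
--         u, v = wires[i]
--         best = min(best, abs(_comp(n, wires, i, u) - _comp(n, wires, i, v)))
--     return best
-- ===== Notes on version B (the rewrite author's own statement) =====
-- stated objective: alternative
-- what changed: Replaces A's per-edge double BFS (adjacency lists mutated by del/index, a deque, a visited array) with queue-free label propagation: for each removed wire, component sizes are computed by repeatedly relaxing the wire list itself until no label changes, so no adjacency structure and no queue exist at all.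
import Mathlib
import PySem

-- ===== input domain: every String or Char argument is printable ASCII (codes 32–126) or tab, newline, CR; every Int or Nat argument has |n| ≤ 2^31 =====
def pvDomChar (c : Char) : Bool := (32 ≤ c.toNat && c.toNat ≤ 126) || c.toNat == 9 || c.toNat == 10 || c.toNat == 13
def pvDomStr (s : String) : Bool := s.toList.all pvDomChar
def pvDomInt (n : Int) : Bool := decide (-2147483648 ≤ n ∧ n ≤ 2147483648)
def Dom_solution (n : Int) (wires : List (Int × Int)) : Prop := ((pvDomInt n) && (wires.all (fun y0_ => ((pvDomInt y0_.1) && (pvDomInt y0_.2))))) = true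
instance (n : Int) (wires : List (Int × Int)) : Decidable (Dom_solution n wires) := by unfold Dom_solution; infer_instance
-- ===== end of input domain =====

-- B replaces A's per-edge double BFS (mutated adjacency lists + a deque) with queue-free
-- label propagation over the wire list itself (objective: alternative algorithm, not speed).

-- ===== PORT A =====

def pyAppendAt (m : List (List Int)) (i : Int) (x : Int) : List (List Int) :=
  PySem.List.pySetD m i (PySem.List.pyGetD m i [] ++ [x])


def pyDelValAt (m : List (List Int)) (i : Int) (x : Int) : List (List Int) :=
  match PySem.List.index? (PySem.List.pyGetD m i []) x with
  | some k => PySem.List.pySetD m i ((PySem.List.pyGetD m i []).eraseIdx k)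
  | none => m


def bfsLoop (matrix : List (List Int)) : Nat → List Int → List Bool → Int → Int
  | 0, _, _, cnt => cnt
  | fuel+1, q, visited, cnt =>
    match q with
    | [] => cnt
    | tower :: rest =>
      let st := (PySem.List.pyGetD matrix tower []).foldl
        (fun (st : List Int × List Bool × Int) ntower =>
          if PySem.List.pyGetD st.2.1 ntower false then st
          else (st.1 ++ [ntower], PySem.List.pySetD st.2.1 ntower true, st.2.2 + 1))
        (rest, visited, cnt)
      bfsLoop matrix fuel st.1 st.2.1 st.2.2


def countTower (matrix : List (List Int)) (start : Int) (n : Int) : Int :=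
  bfsLoop matrix (n+2).toNat [start]
    (PySem.List.pySetD (List.replicate (n+1).toNat false) start true) 1


def solution (n : Int) (wires : List (Int × Int)) : Int :=
  let matrix0 : List (List Int) := (PySem.List.pyRange 0 (n+1) 1).map (fun _ => ([] : List Int))
  let matrix := wires.foldl (fun m uv => pyAppendAt (pyAppendAt m uv.1 uv.2) uv.2 uv.1) matrix0
  (wires.foldl
    (fun (st : List (List Int) × Int) uv =>
      let m2 := pyDelValAt (pyDelValAt st.1 uv.1 uv.2) uv.2 uv.1
      let ans := min st.2 |countTower m2 uv.1 n - countTower m2 uv.2 n|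
      (pyAppendAt (pyAppendAt m2 uv.1 uv.2) uv.2 uv.1, ans))
    (matrix, 99999999)).2


-- ===== PORT B =====

def relaxScan (wires : List (Int × Int)) (skip : Int) (reach : List Bool) (cnt : Int) :
    List Bool × Int × Bool :=
  (PySem.List.pyRange 0 (PySem.List.len wires) 1).foldl
    (fun (st : List Bool × Int × Bool) j =>
      if j = skip then st
      else
        let ab := PySem.List.pyGetD wires j (0, 0)
        let st1 := if PySem.List.pyGetD st.1 ab.1 false && !(PySem.List.pyGetD st.1 ab.2 false)
                   then (PySem.List.pySetD st.1 ab.2 true, st.2.1 + 1, true) else st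
        if PySem.List.pyGetD st1.1 ab.2 false && !(PySem.List.pyGetD st1.1 ab.1 false)
        then (PySem.List.pySetD st1.1 ab.1 true, st1.2.1 + 1, true) else st1)
    (reach, cnt, false)


def compRounds (wires : List (Int × Int)) (skip : Int) : Nat → List Bool → Int → Int
  | 0, _, cnt => cnt
  | fuel+1, reach, cnt =>
    let st := relaxScan wires skip reach cnt
    if st.2.2 then compRounds wires skip fuel st.1 st.2.1 else st.2.1


def comp (n : Int) (wires : List (Int × Int)) (skip start : Int) : Int :=
  compRounds wires skip (n+1).toNat
    (PySem.List.pySetD (List.replicate (n+1).toNat false) start true) 1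


def solution_alt (n : Int) (wires : List (Int × Int)) : Int :=
  (PySem.List.pyRange 0 (PySem.List.len wires) 1).foldl
    (fun best i =>
      let uv := PySem.List.pyGetD wires i (0, 0)
      min best |comp n wires i uv.1 - comp n wires i uv.2|)
    99999999

-- ===== PRECONDITION & SPEC =====

-- Exactly the inputs on which the Python A returns: every wire endpoint must be a valid
-- (possibly negative) Python index into the n+1 adjacency rows; otherwise A raises IndexError.
def Pre_solution (n : Int) (wires : List (Int × Int)) : Prop :=
  ∀ p ∈ wires, -(n+1) ≤ p.1 ∧ p.1 ≤ n ∧ -(n+1) ≤ p.2 ∧ p.2 ≤ n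

instance (n : Int) (wires : List (Int × Int)) : Decidable (Pre_solution n wires) := by
  unfold Pre_solution; infer_instance

def pvWitness_solution : Int × (List (Int × Int)) := (4, [(1, 2), (2, 3), (1, 3), (3, 4)])

def Spec_solution (n : Int) (wires : List (Int × Int)) (out : Int) : Prop := out = solution_alt n wires
instance (n : Int) (wires : List (Int × Int)) (out : Int) : Decidable (Spec_solution n wires out) := by
  unfold Spec_solution; infer_instance

-- ===== CLAIM (what is proved, stated in full; the proofs are below) =====
def Claim_equal_solution : Prop := ∀ (n : Int) (wires : List (Int × Int)), Dom_solution n wires → Pre_solution n wires → Spec_solution n wires (solution n wires)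

-- ===== LEMMAS AND PROOFS =====

def wIdx (N : Nat) (x : Int) : Nat := if 0 ≤ x then x.toNat else N - (-x).toNat
def InR (n x : Int) : Prop := -(n+1) ≤ x ∧ x ≤ n
def Mk (l : List Bool) (k : Nat) : Prop := l.getD k false = true
def LeB (s t : List Bool) : Prop := ∀ k, Mk s k → Mk t k


theorem tc_le (l : List Bool) : l.count true ≤ l.length := List.count_le_length

theorem getD_set {α : Type} (l : List α) (j k : Nat) (v d : α) :
    (l.set j v).getD k d = if j = k ∧ j < l.length then v else l.getD k d := by
  induction l generalizing j k with
  | nil => simp [List.set]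
  | cons a l ih =>
    cases j with
    | zero => cases k <;> simp [List.getD]
    | succ j =>
      cases k with
      | zero => simp [List.getD]
      | succ k => simpa [List.getD, Nat.succ_lt_succ_iff] using ih j k

theorem count_set_true (l : List Bool) (k : Nat) (hk : k < l.length)
    (hf : l.getD k false = false) : (l.set k true).count true = l.count true + 1 := by
  induction l generalizing k with
  | nil => simp at hk
  | cons a l ih =>
    cases k with
    | zero => simp [List.getD] at hf; simp [hf, List.count_cons]
    | succ k =>
      simp only [List.getD, List.getElem?_cons_succ] at hf
      have := ih k (by simpa using hk) (by simpa [List.getD] using hf)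
      cases a <;> simp [List.count_cons, List.set, this] <;> omega

theorem tc_lt_of_false (l : List Bool) (k : Nat) (hk : k < l.length)
    (hf : l.getD k false = false) : l.count true < l.length := by
  have h1 := count_set_true l k hk hf
  have h2 : (l.set k true).count true ≤ (l.set k true).length := List.count_le_length
  simpa [h1] using h2

theorem getD_replicate (N k : Nat) : (List.replicate N false).getD k false = false := by
  induction N generalizing k with
  | zero => simp [List.getD]
  | succ N ih => cases k <;> simp [List.replicate, List.getD] <;> simpa [List.getD] using ih _

theorem tc_mono (s t : List Bool) (hl : s.length = t.length) (h : LeB s t) :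
    s.count true ≤ t.count true := by
  induction s generalizing t with
  | nil => simp
  | cons a s ih =>
    cases t with
    | nil => simp at hl
    | cons b t =>
      have h0 : a = true → b = true := by
        intro ha; have := h 0; simpa [Mk, List.getD, ha] using this
      have hrest : LeB s t := by
        intro k hk
        have := h (k+1); simpa [Mk, List.getD] using this (by simpa [Mk, List.getD] using hk)
      have := ih t (by simpa using hl) hrest
      cases a with
      | false => cases b <;> simp [List.count_cons] <;> omega
      | true => simp [List.count_cons, h0 rfl] ; omega

theorem eq_of_leb (s t : List Bool) (hl : s.length = t.length) (h1 : LeB s t) (h2 : LeB t s) :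
    s = t := by
  apply List.ext_getElem hl
  intro k hk1 hk2
  have e1 : Mk s k ↔ s[k] = true := by
    simp [Mk, List.getD_eq_getElem?_getD, List.getElem?_eq_getElem hk1]
  have e2 : Mk t k ↔ t[k] = true := by
    simp [Mk, List.getD_eq_getElem?_getD, List.getElem?_eq_getElem hk2]
  cases hs : s[k] with
  | true => simp [hs, e2.mp (h1 k (e1.mpr hs))]
  | false =>
    cases ht : t[k] with
    | false => simp [hs, ht]
    | true => have := e1.mp (h2 k (e2.mpr ht)); simp [hs] at this

theorem pyIdx_wIdx (N : Nat) (x : Int) (h1 : -(N:Int) ≤ x) (h2 : x < N) :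
    PySem.List.pyIdx? N x = some (wIdx N x) := by
  unfold PySem.List.pyIdx? wIdx
  split
  · simp [h2]
  · simp [h1]

theorem wIdx_lt (n x : Int) (hn : 0 ≤ n) (hx : InR n x) : wIdx (n+1).toNat x < (n+1).toNat := by
  obtain ⟨hx1, hx2⟩ := hx
  unfold wIdx
  split <;> omega

theorem getD_bridge {α : Type} (n : Int) (xs : List α) (x : Int) (d : α) (hn : 0 ≤ n)
    (hx : InR n x) (hlen : xs.length = (n+1).toNat) :
    PySem.List.pyGetD xs x d = xs.getD (wIdx (n+1).toNat x) d := by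
  obtain ⟨hx1, hx2⟩ := hx
  unfold PySem.List.pyGetD PySem.List.pyGet?
  rw [hlen, pyIdx_wIdx _ _ (by omega) (by omega)]
  simp [List.getD]

theorem setD_bridge {α : Type} (n : Int) (xs : List α) (x : Int) (v : α) (hn : 0 ≤ n)
    (hx : InR n x) (hlen : xs.length = (n+1).toNat) :
    PySem.List.pySetD xs x v = xs.set (wIdx (n+1).toNat x) v := by
  obtain ⟨hx1, hx2⟩ := hx
  unfold PySem.List.pySetD PySem.List.pySet?
  rw [hlen, pyIdx_wIdx _ _ (by omega) (by omega)]
  simp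

def ACnt (n : Int) (ws : List (Int × Int)) (k : Nat) (b : Int) : Nat :=
  ws.countP (fun p => decide (wIdx (n+1).toNat p.1 = k) && decide (p.2 = b)) +
  ws.countP (fun p => decide (wIdx (n+1).toNat p.2 = k) && decide (p.1 = b))

def MInv (n : Int) (wires : List (Int × Int)) (m : List (List Int)) : Prop :=
  m.length = (n+1).toNat ∧ ∀ (k : Nat) (b : Int), (m.getD k []).count b = ACnt n wires k b

def RowsOf (n : Int) (wires : List (Int × Int)) (skip : Nat) (m : List (List Int)) : Prop :=
  ∀ (k : Nat) (b : Int), b ∈ m.getD k [] ↔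
    ∃ (j : Nat) (hj : j < wires.length), j ≠ skip ∧
      ((wIdx (n+1).toNat (wires[j].1) = k ∧ wires[j].2 = b) ∨
       (wIdx (n+1).toNat (wires[j].2) = k ∧ wires[j].1 = b))


theorem appendAt_facts (n : Int) (m : List (List Int)) (r x : Int) (hn : 0 ≤ n)
    (hr : InR n r) (hm : m.length = (n+1).toNat) :
    (pyAppendAt m r x).length = (n+1).toNat ∧
    ∀ (k : Nat) (b : Int), ((pyAppendAt m r x).getD k []).count b =
      (m.getD k []).count b + (if wIdx (n+1).toNat r = k ∧ x = b then 1 else 0) := by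
  have hb := getD_bridge n m r ([] : List Int) hn hr hm
  have hs := setD_bridge n m r (PySem.List.pyGetD m r [] ++ [x]) hn hr hm
  have hw := wIdx_lt n r hn hr
  unfold pyAppendAt
  rw [hs, hb]
  constructor
  · simpa using hm
  · intro k b
    rw [getD_set]
    by_cases h : wIdx (n+1).toNat r = k
    · rw [if_pos ⟨h, by omega⟩, List.count_append, List.count_singleton, h]
      by_cases hx : x = b <;> simp [hx]
    · rw [if_neg (by tauto)]
      simp [h]

theorem delAt_facts (n : Int) (m : List (List Int)) (r x : Int) (hn : 0 ≤ n)
    (hr : InR n r) (hm : m.length = (n+1).toNat)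
    (hx : x ∈ m.getD (wIdx (n+1).toNat r) []) :
    (pyDelValAt m r x).length = (n+1).toNat ∧
    ∀ (k : Nat) (b : Int), ((pyDelValAt m r x).getD k []).count b +
      (if wIdx (n+1).toNat r = k ∧ x = b then 1 else 0) = (m.getD k []).count b := by
  have hb := getD_bridge n m r ([] : List Int) hn hr hm
  have hw := wIdx_lt n r hn hr
  obtain ⟨k0, hk0⟩ : ∃ k0, List.idxOf? x (m.getD (wIdx (n+1).toNat r) []) = some k0 := by
    cases h : List.idxOf? x (m.getD (wIdx (n+1).toNat r) []) with
    | none => exact absurd hx (List.idxOf?_eq_none_iff.mp h)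
    | some k0 => exact ⟨k0, rfl⟩
  have herase : (m.getD (wIdx (n+1).toNat r) []).eraseIdx k0 = (m.getD (wIdx (n+1).toNat r) []).erase x := by
    rw [List.erase_eq_eraseIdx, hk0]
  have hdel : pyDelValAt m r x = m.set (wIdx (n+1).toNat r) ((m.getD (wIdx (n+1).toNat r) []).erase x) := by
    unfold pyDelValAt
    rw [hb]
    simp only [PySem.List.index?, hk0]
    rw [herase, setD_bridge n m r _ hn hr hm]
  rw [hdel]
  constructor
  · simpa using hm
  · intro k b
    rw [getD_set]
    by_cases h : wIdx (n+1).toNat r = k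
    · rw [if_pos ⟨h, by omega⟩, ← h]
      have hce := List.count_erase (a := b) (b := x) (l := m.getD (wIdx (n+1).toNat r) [])
      by_cases hxb : x = b
      · subst hxb
        have hpos : 0 < (m.getD (wIdx (n+1).toNat r) []).count x := List.count_pos_iff.mpr hx
        simp only [beq_self_eq_true, if_pos trivial] at hce
        rw [hce, if_pos ⟨rfl, rfl⟩]
        omega
      · have hbx : (x == b) = false := beq_eq_false_iff_ne.mpr hxb
        rw [hbx] at hce
        simp only [Bool.false_eq_true, if_false] at hce
        rw [if_neg (fun hc => hxb hc.2), hce]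
        omega
    · rw [if_neg (by tauto)]
      simp [h]

theorem matrix0_facts (n : Int) (hn : 0 ≤ n) :
    ((PySem.List.pyRange 0 (n+1) 1).map (fun _ => ([] : List Int))).length = (n+1).toNat ∧
    ∀ k : Nat, ((PySem.List.pyRange 0 (n+1) 1).map (fun _ => ([] : List Int))).getD k [] = [] := by
  constructor
  · simp [PySem.List.length_pyRange_one]
  · intro k
    rw [List.getD_eq_getElem?_getD, List.getElem?_map]
    cases (PySem.List.pyRange 0 (n+1) 1)[k]? <;> simp

theorem ACnt_cons (n : Int) (p : Int × Int) (ws : List (Int × Int)) (k : Nat) (b : Int) :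
    ACnt n (p :: ws) k b = ACnt n ws k b +
      ((if wIdx (n+1).toNat p.1 = k ∧ p.2 = b then 1 else 0) +
       (if wIdx (n+1).toNat p.2 = k ∧ p.1 = b then 1 else 0)) := by
  simp only [ACnt, List.countP_cons, Bool.and_eq_true, decide_eq_true_eq]
  by_cases h1 : wIdx (n+1).toNat p.1 = k ∧ p.2 = b <;>
    by_cases h2 : wIdx (n+1).toNat p.2 = k ∧ p.1 = b <;>
      simp [h1, h2] <;> omega

theorem build_facts (n : Int) (ws : List (Int × Int)) (hn : 0 ≤ n)
    (hws : ∀ p ∈ ws, InR n p.1 ∧ InR n p.2) :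
    ∀ m : List (List Int), m.length = (n+1).toNat →
    (ws.foldl (fun m uv => pyAppendAt (pyAppendAt m uv.1 uv.2) uv.2 uv.1) m).length = (n+1).toNat ∧
    ∀ (k : Nat) (b : Int),
      ((ws.foldl (fun m uv => pyAppendAt (pyAppendAt m uv.1 uv.2) uv.2 uv.1) m).getD k []).count b =
        (m.getD k []).count b + ACnt n ws k b := by
  induction ws with
  | nil => intro m hm; simp [List.foldl, ACnt, hm]
  | cons p rest ih =>
    intro m hm
    obtain ⟨hp1, hp2⟩ := hws p (by simp)
    have h1 := appendAt_facts n m p.1 p.2 hn hp1 hm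
    have h2 := appendAt_facts n (pyAppendAt m p.1 p.2) p.2 p.1 hn hp2 h1.1
    have ih' := ih (fun q hq => hws q (by simp [hq])) (pyAppendAt (pyAppendAt m p.1 p.2) p.2 p.1) h2.1
    refine ⟨by simpa using ih'.1, ?_⟩
    intro k b
    rw [List.foldl_cons]
    rw [ih'.2 k b, h2.2 k b, h1.2 k b, ACnt_cons]
    omega

theorem ACnt_split (n : Int) (wires : List (Int × Int)) (i : Nat) (hi : i < wires.length)
    (k : Nat) (b : Int) :
    ACnt n wires k b = ACnt n (wires.take i) k b + ACnt n (wires.drop (i+1)) k b +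
      ((if wIdx (n+1).toNat (wires[i].1) = k ∧ wires[i].2 = b then 1 else 0) +
       (if wIdx (n+1).toNat (wires[i].2) = k ∧ wires[i].1 = b then 1 else 0)) := by
  conv_lhs => rw [← List.take_append_drop i wires, ← List.getElem_cons_drop hi]
  unfold ACnt
  simp only [List.countP_append, List.countP_cons, Bool.and_eq_true, decide_eq_true_eq]
  by_cases h1 : wIdx (n+1).toNat (wires[i].1) = k ∧ wires[i].2 = b <;>
    by_cases h2 : wIdx (n+1).toNat (wires[i].2) = k ∧ wires[i].1 = b <;>
      simp [h1, h2] <;> omega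

theorem ACnt_pos_iff (n : Int) (ws : List (Int × Int)) (k : Nat) (b : Int) :
    0 < ACnt n ws k b ↔ ∃ p ∈ ws,
      ((wIdx (n+1).toNat p.1 = k ∧ p.2 = b) ∨ (wIdx (n+1).toNat p.2 = k ∧ p.1 = b)) := by
  unfold ACnt
  constructor
  · intro h
    by_cases h1 : 0 < ws.countP (fun p => decide (wIdx (n+1).toNat p.1 = k) && decide (p.2 = b))
    · obtain ⟨p, hp, hpf⟩ := List.countP_pos_iff.mp h1
      simp only [Bool.and_eq_true, decide_eq_true_eq] at hpf
      exact ⟨p, hp, Or.inl hpf⟩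
    · have h2 : 0 < ws.countP (fun p => decide (wIdx (n+1).toNat p.2 = k) && decide (p.1 = b)) := by
        omega
      obtain ⟨p, hp, hpf⟩ := List.countP_pos_iff.mp h2
      simp only [Bool.and_eq_true, decide_eq_true_eq] at hpf
      exact ⟨p, hp, Or.inr hpf⟩
  · rintro ⟨p, hp, h | h⟩
    · have : 0 < ws.countP (fun p => decide (wIdx (n+1).toNat p.1 = k) && decide (p.2 = b)) :=
        List.countP_pos_iff.mpr ⟨p, hp, by simp [h.1, h.2]⟩
      omega
    · have : 0 < ws.countP (fun p => decide (wIdx (n+1).toNat p.2 = k) && decide (p.1 = b)) :=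
        List.countP_pos_iff.mpr ⟨p, hp, by simp [h.1, h.2]⟩
      omega


def GoodW (n : Int) (wires : List (Int × Int)) (skip : Int) (t : List Bool) : Prop :=
  ∀ (j : Nat) (hj : j < wires.length), (j : Int) ≠ skip →
    (Mk t (wIdx (n+1).toNat (wires[j].1)) ↔ Mk t (wIdx (n+1).toNat (wires[j].2)))

def GoodRow (n : Int) (m : List (List Int)) (t : List Bool) : Prop :=
  ∀ k, k < (n+1).toNat → Mk t k → ∀ b ∈ m.getD k [], Mk t (wIdx (n+1).toNat b)

theorem memsplit (wires : List (Int × Int)) (i : Nat) (hi : i < wires.length)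
    (P : (Int × Int) → Prop) :
    ((∃ p ∈ wires.take i, P p) ∨ (∃ p ∈ wires.drop (i+1), P p)) ↔
    ∃ (j : Nat) (hj : j < wires.length), j ≠ i ∧ P wires[j] := by
  constructor
  · rintro (⟨p, hp, hP⟩ | ⟨p, hp, hP⟩)
    · obtain ⟨j, hj, he⟩ := List.mem_take_iff_getElem.mp hp
      exact ⟨j, by omega, by omega, by rw [he]; exact hP⟩
    · obtain ⟨j, hj, he⟩ := List.mem_drop_iff_getElem.mp hp
      exact ⟨i+1+j, by omega, by omega, by rw [he]; exact hP⟩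
  · rintro ⟨j, hj, hne, hP⟩
    rcases Nat.lt_or_ge j i with hlt | hge
    · left
      refine ⟨wires[j], List.mem_take_iff_getElem.mpr ⟨j, by omega, rfl⟩, hP⟩
    · right
      have hj' : j - (i+1) + (i+1) < wires.length := by omega
      refine ⟨wires[j], List.mem_drop_iff_getElem.mpr ⟨j - (i+1), hj', ?_⟩, hP⟩
      congr 1
      omega

theorem mutate_facts (n : Int) (wires : List (Int × Int)) (m : List (List Int)) (i : Nat)
    (hn : 0 ≤ n) (hi : i < wires.length) (hP : ∀ p ∈ wires, InR n p.1 ∧ InR n p.2)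
    (hm : MInv n wires m) :
    (pyDelValAt (pyDelValAt m (wires[i].1) (wires[i].2)) (wires[i].2) (wires[i].1)).length = (n+1).toNat ∧
    RowsOf n wires i (pyDelValAt (pyDelValAt m (wires[i].1) (wires[i].2)) (wires[i].2) (wires[i].1)) ∧
    MInv n wires (pyAppendAt (pyAppendAt
      (pyDelValAt (pyDelValAt m (wires[i].1) (wires[i].2)) (wires[i].2) (wires[i].1))
      (wires[i].1) (wires[i].2)) (wires[i].2) (wires[i].1)) := by
  obtain ⟨hu, hv⟩ := hP wires[i] (wires.getElem_mem hi)
  obtain ⟨hmlen, hmc⟩ := hm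
  have hsplit := fun k b => ACnt_split n wires i hi k b
  -- v is present in row (wIdx u)
  have hvmem : wires[i].2 ∈ m.getD (wIdx (n+1).toNat (wires[i].1)) [] := by
    apply List.count_pos_iff.mp
    rw [hmc]
    have := hsplit (wIdx (n+1).toNat (wires[i].1)) (wires[i].2)
    rw [if_pos ⟨rfl, rfl⟩] at this
    omega
  have h1 := delAt_facts n m (wires[i].1) (wires[i].2) hn hu hmlen hvmem
  -- u is present in row (wIdx v) of m1
  have humem : wires[i].1 ∈ (pyDelValAt m (wires[i].1) (wires[i].2)).getD (wIdx (n+1).toNat (wires[i].2)) [] := by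
    apply List.count_pos_iff.mp
    have he := h1.2 (wIdx (n+1).toNat (wires[i].2)) (wires[i].1)
    have := hsplit (wIdx (n+1).toNat (wires[i].2)) (wires[i].1)
    rw [hmc] at he
    have hind : (if wIdx (n+1).toNat (wires[i].2) = wIdx (n+1).toNat (wires[i].2) ∧
        wires[i].1 = wires[i].1 then 1 else 0) = 1 := if_pos ⟨rfl, rfl⟩
    rw [hind] at this
    omega
  have h2 := delAt_facts n (pyDelValAt m (wires[i].1) (wires[i].2)) (wires[i].2) (wires[i].1) hn hv h1.1 humem
  -- count of the doubly-deleted matrix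
  have hm2c : ∀ (k : Nat) (b : Int),
      ((pyDelValAt (pyDelValAt m (wires[i].1) (wires[i].2)) (wires[i].2) (wires[i].1)).getD k []).count b =
      ACnt n (wires.take i) k b + ACnt n (wires.drop (i+1)) k b := by
    intro k b
    have e2 := h2.2 k b
    have e1 := h1.2 k b
    rw [hmc] at e1
    have := hsplit k b
    omega
  refine ⟨h2.1, ?_, ?_⟩
  · intro k b
    rw [← List.count_pos_iff, hm2c]
    have hiff : (0 < ACnt n (wires.take i) k b ∨ 0 < ACnt n (wires.drop (i+1)) k b) ↔
        ∃ (j : Nat) (hj : j < wires.length), j ≠ i ∧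
          ((wIdx (n+1).toNat (wires[j].1) = k ∧ wires[j].2 = b) ∨
           (wIdx (n+1).toNat (wires[j].2) = k ∧ wires[j].1 = b)) := by
      rw [ACnt_pos_iff, ACnt_pos_iff]
      exact memsplit wires i hi _
    constructor
    · intro h; exact hiff.mp (by omega)
    · intro h; have := hiff.mpr h; omega
  · have a1 := appendAt_facts n
      (pyDelValAt (pyDelValAt m (wires[i].1) (wires[i].2)) (wires[i].2) (wires[i].1))
      (wires[i].1) (wires[i].2) hn hu h2.1
    have a2 := appendAt_facts n _ (wires[i].2) (wires[i].1) hn hv a1.1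
    refine ⟨a2.1, ?_⟩
    intro k b
    have := hsplit k b
    rw [a2.2 k b, a1.2 k b, hm2c k b]
    omega

theorem rows_ent (n : Int) (wires : List (Int × Int)) (i : Nat) (m : List (List Int))
    (hP : ∀ p ∈ wires, InR n p.1 ∧ InR n p.2) (hR : RowsOf n wires i m) :
    ∀ (k : Nat), ∀ b ∈ m.getD k [], InR n b := by
  intro k b hb
  obtain ⟨j, hj, _, h⟩ := (hR k b).mp hb
  obtain ⟨h1, h2⟩ := hP wires[j] (wires.getElem_mem hj)
  rcases h with ⟨_, he⟩ | ⟨_, he⟩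
  · rw [← he]; exact h2
  · rw [← he]; exact h1

theorem goodW_of_goodRow (n : Int) (wires : List (Int × Int)) (i : Nat) (m : List (List Int))
    (hn : 0 ≤ n) (hP : ∀ p ∈ wires, InR n p.1 ∧ InR n p.2) (hR : RowsOf n wires i m)
    (t : List Bool) (h : GoodRow n m t) : GoodW n wires (i : Int) t := by
  intro j hj hne
  have hne' : j ≠ i := fun he => hne (by rw [he])
  obtain ⟨h1, h2⟩ := hP wires[j] (wires.getElem_mem hj)
  constructor
  · intro hmk
    exact h _ (wIdx_lt n _ hn h1) hmk wires[j].2 ((hR _ _).mpr ⟨j, hj, hne', Or.inl ⟨rfl, rfl⟩⟩)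
  · intro hmk
    exact h _ (wIdx_lt n _ hn h2) hmk wires[j].1 ((hR _ _).mpr ⟨j, hj, hne', Or.inr ⟨rfl, rfl⟩⟩)

theorem goodRow_of_goodW (n : Int) (wires : List (Int × Int)) (i : Nat) (m : List (List Int))
    (hR : RowsOf n wires i m) (t : List Bool) (h : GoodW n wires (i : Int) t) :
    GoodRow n m t := by
  intro k hk hmk b hb
  obtain ⟨j, hj, hne, hc⟩ := (hR k b).mp hb
  have hne' : (j : Int) ≠ (i : Int) := by exact_mod_cast fun he => hne (by exact_mod_cast he)
  have hgw := h j hj hne'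
  rcases hc with ⟨he1, he2⟩ | ⟨he1, he2⟩
  · rw [← he2]; exact hgw.mp (by rw [he1]; exact hmk)
  · rw [← he2]; exact hgw.mpr (by rw [he1]; exact hmk)

def bfsLoopV (matrix : List (List Int)) : Nat → List Int → List Bool → Int → (List Bool × Int)
  | 0, _, vis, cnt => (vis, cnt)
  | fuel+1, q, visited, cnt =>
    match q with
    | [] => (visited, cnt)
    | tower :: rest =>
      let st := (PySem.List.pyGetD matrix tower []).foldl
        (fun (st : List Int × List Bool × Int) ntower =>
          if PySem.List.pyGetD st.2.1 ntower false then st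
          else (st.1 ++ [ntower], PySem.List.pySetD st.2.1 ntower true, st.2.2 + 1))
        (rest, visited, cnt)
      bfsLoopV matrix fuel st.1 st.2.1 st.2.2

def bstep (st : List Int × List Bool × Int) (ntower : Int) : List Int × List Bool × Int :=
  if PySem.List.pyGetD st.2.1 ntower false then st
  else (st.1 ++ [ntower], PySem.List.pySetD st.2.1 ntower true, st.2.2 + 1)

theorem bstep_eq : (fun (st : List Int × List Bool × Int) ntower =>
    if PySem.List.pyGetD st.2.1 ntower false then st
    else (st.1 ++ [ntower], PySem.List.pySetD st.2.1 ntower true, st.2.2 + 1)) = bstep := rfl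

theorem bfsLoop_eq_V (matrix : List (List Int)) (fuel : Nat) : ∀ (q : List Int) (vis : List Bool)
    (cnt : Int), bfsLoop matrix fuel q vis cnt = (bfsLoopV matrix fuel q vis cnt).2 := by
  induction fuel with
  | zero => intro q vis cnt; rfl
  | succ fuel ih =>
    intro q vis cnt
    cases q with
    | nil => rfl
    | cons t rest => simp only [bfsLoop, bfsLoopV]; exact ih _ _ _

theorem bfold_main (n : Int) (row : List Int) (hn : 0 ≤ n) (hrow : ∀ b ∈ row, InR n b) :
    ∀ st : List Int × List Bool × Int,
      st.2.1.length = (n+1).toNat → st.2.2 = (st.2.1.count true : Int) →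
      (row.foldl bstep st).2.1.length = (n+1).toNat ∧
      (row.foldl bstep st).2.2 = ((row.foldl bstep st).2.1.count true : Int) ∧
      LeB st.2.1 (row.foldl bstep st).2.1 ∧
      (∀ x ∈ st.1, x ∈ (row.foldl bstep st).1) ∧
      (∀ x ∈ (row.foldl bstep st).1, x ∈ st.1 ∨ x ∈ row) ∧
      (∀ b ∈ row, Mk (row.foldl bstep st).2.1 (wIdx (n+1).toNat b)) ∧
      ((row.foldl bstep st).1.length + ((n+1).toNat - (row.foldl bstep st).2.1.count true)
         = st.1.length + ((n+1).toNat - st.2.1.count true)) ∧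
      (∀ k, Mk (row.foldl bstep st).2.1 k →
         Mk st.2.1 k ∨ ∃ x ∈ (row.foldl bstep st).1, wIdx (n+1).toNat x = k) := by
  induction row with
  | nil =>
    intro st h1 h2
    refine ⟨h1, h2, fun k h => h, fun x h => h, fun x h => Or.inl h, by simp, rfl,
      fun k h => Or.inl h⟩
  | cons b row ih =>
    intro st h1 h2
    have hb : InR n b := hrow b (by simp)
    have hrow' : ∀ x ∈ row, InR n x := fun x hx => hrow x (by simp [hx])
    have hwb : wIdx (n+1).toNat b < (n+1).toNat := wIdx_lt n b hn hb
    have hget : PySem.List.pyGetD st.2.1 b false = st.2.1.getD (wIdx (n+1).toNat b) false :=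
      getD_bridge n st.2.1 b false hn hb h1
    rw [List.foldl_cons]
    by_cases hg : PySem.List.pyGetD st.2.1 b false = true
    · -- already visited: state unchanged
      have hs : bstep st b = st := by unfold bstep; rw [hg]; simp
      rw [hs]
      obtain ⟨c1, c2, c3, c4, c5, c6, c7, c8⟩ := ih hrow' st h1 h2
      refine ⟨c1, c2, c3, c4, fun x hx => ?_, ?_, c7, c8⟩
      · rcases c5 x hx with h | h
        · exact Or.inl h
        · exact Or.inr (by simp [h])
      · intro x hx
        rcases List.mem_cons.mp hx with rfl | hx'
        · exact c3 _ (by rw [Mk, ← hget]; exact hg)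
        · exact c6 x hx'
    · -- newly visited
      have hgb : PySem.List.pyGetD st.2.1 b false = false := Bool.eq_false_iff.mpr hg
      have hgf : st.2.1.getD (wIdx (n+1).toNat b) false = false := by
        rw [← hget]; exact hgb
      have hs : bstep st b =
          (st.1 ++ [b], st.2.1.set (wIdx (n+1).toNat b) true, st.2.2 + 1) := by
        unfold bstep
        rw [hgb, setD_bridge n st.2.1 b true hn hb h1]
        simp
      rw [hs]
      have hlen' : (st.2.1.set (wIdx (n+1).toNat b) true).length = (n+1).toNat := by
        simpa using h1
      have hcnt' : (st.2.1.set (wIdx (n+1).toNat b) true).count true = st.2.1.count true + 1 :=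
        count_set_true st.2.1 _ (by omega) hgf
      have htc : st.2.1.count true < (n+1).toNat := by
        have := tc_lt_of_false st.2.1 _ (by omega) hgf
        omega
      obtain ⟨c1, c2, c3, c4, c5, c6, c7, c8⟩ :=
        ih hrow' (st.1 ++ [b], st.2.1.set (wIdx (n+1).toNat b) true, st.2.2 + 1)
          hlen' (by
            show st.2.2 + 1 = ((st.2.1.set (wIdx (n+1).toNat b) true).count true : Int)
            rw [hcnt']; omega)
      have hleb : LeB st.2.1 (st.2.1.set (wIdx (n+1).toNat b) true) := by
        intro k hk
        rw [Mk, getD_set]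
        split
        · rfl
        · exact hk
      refine ⟨c1, c2, fun k hk => c3 k (hleb k hk), fun x hx => c4 x (by simp [hx]), ?_, ?_, ?_, ?_⟩
      · intro x hx
        rcases c5 x hx with h | h
        · rcases List.mem_append.mp h with h' | h'
          · exact Or.inl h'
          · simp at h'; exact Or.inr (by simp [h'])
        · exact Or.inr (by simp [h])
      · intro x hx
        rcases List.mem_cons.mp hx with rfl | hx'
        · apply c3
          rw [Mk, getD_set]
          simp [hwb, h1]
        · exact c6 x hx'
      · rw [c7]
        simp only [List.length_append, List.length_singleton, hcnt']
        omega
      · intro k hk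
        rcases c8 k hk with h | h
        · rw [Mk, getD_set] at h
          by_cases hc : wIdx (n+1).toNat b = k ∧ wIdx (n+1).toNat b < st.2.1.length
          · rw [if_pos hc] at h
            exact Or.inr ⟨b, c4 b (by simp), hc.1⟩
          · rw [if_neg hc] at h
            exact Or.inl h
        · exact Or.inr h
def CInv (n : Int) (m : List (List Int)) (q : List Int) (vis : List Bool) : Prop :=
  ∀ k, k < (n+1).toNat → Mk vis k →
    (∃ x ∈ q, InR n x ∧ wIdx (n+1).toNat x = k) ∨
    (∀ b ∈ m.getD k [], Mk vis (wIdx (n+1).toNat b))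

theorem bfs_main (n : Int) (m : List (List Int)) (hn : 0 ≤ n)
    (hm : m.length = (n+1).toNat) (hEnt : ∀ (k : Nat), ∀ b ∈ m.getD k [], InR n b) :
    ∀ (fuel : Nat) (q : List Int) (vis : List Bool) (cnt : Int),
      (∀ x ∈ q, InR n x) → vis.length = (n+1).toNat → cnt = (vis.count true : Int) →
      (∀ x ∈ q, Mk vis (wIdx (n+1).toNat x)) → CInv n m q vis →
      q.length + ((n+1).toNat - vis.count true) ≤ fuel →
    (bfsLoopV m fuel q vis cnt).1.length = (n+1).toNat ∧
    (bfsLoopV m fuel q vis cnt).2 = ((bfsLoopV m fuel q vis cnt).1.count true : Int) ∧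
    LeB vis (bfsLoopV m fuel q vis cnt).1 ∧
    GoodRow n m (bfsLoopV m fuel q vis cnt).1 := by
  intro fuel
  induction fuel with
  | zero =>
    intro q vis cnt hq hlen hcnt hmk hci hfuel
    have hq0 : q = [] := List.eq_nil_of_length_eq_zero (by omega)
    subst hq0
    refine ⟨hlen, hcnt, fun k h => h, ?_⟩
    intro k hk hmkk b hb
    rcases hci k hk hmkk with ⟨x, hx, _⟩ | h
    · simp at hx
    · exact h b hb
  | succ fuel ih =>
    intro q vis cnt hq hlen hcnt hmk hci hfuel
    cases q with
    | nil =>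
      refine ⟨hlen, hcnt, fun k h => h, ?_⟩
      intro k hk hmkk b hb
      rcases hci k hk hmkk with ⟨x, hx, _⟩ | h
      · simp at hx
      · exact h b hb
    | cons tw rest =>
      have htw : InR n tw := hq tw (by simp)
      have hrowe : PySem.List.pyGetD m tw [] = m.getD (wIdx (n+1).toNat tw) [] :=
        getD_bridge n m tw [] hn htw hm
      have hrowIn : ∀ b ∈ PySem.List.pyGetD m tw [], InR n b := by
        rw [hrowe]; exact hEnt _
      simp only [bfsLoopV, bstep_eq]
      obtain ⟨c1, c2, c3, c4, c5, c6, c7, c8⟩ :=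
        bfold_main n (PySem.List.pyGetD m tw []) hn hrowIn (rest, vis, cnt) hlen hcnt
      set st' := (PySem.List.pyGetD m tw []).foldl bstep (rest, vis, cnt) with hst'
      have hq' : ∀ x ∈ st'.1, InR n x := by
        intro x hx
        rcases c5 x hx with h | h
        · exact hq x (by simp [h])
        · exact hrowIn x h
      have hmk' : ∀ x ∈ st'.1, Mk st'.2.1 (wIdx (n+1).toNat x) := by
        intro x hx
        rcases c5 x hx with h | h
        · exact c3 _ (hmk x (by simp [h]))
        · exact c6 x h
      have hci' : CInv n m st'.1 st'.2.1 := by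
        intro k hk hmkk
        rcases c8 k hmkk with hold | ⟨x, hx, hxw⟩
        · rcases hci k hk hold with ⟨x, hx, hxr, hxw⟩ | h
          · rcases List.mem_cons.mp hx with rfl | hx'
            · right
              intro b hb
              rw [← hxw, ← hrowe] at hb
              exact c6 b hb
            · exact Or.inl ⟨x, c4 x hx', hxr, hxw⟩
          · exact Or.inr (fun b hb => c3 _ (h b hb))
        · exact Or.inl ⟨x, hx, hq' x hx, hxw⟩
      have hfuel' : st'.1.length + ((n+1).toNat - st'.2.1.count true) ≤ fuel := by
        have hlr : (tw :: rest).length = rest.length + 1 := by simp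
        have c7' : st'.1.length + ((n+1).toNat - st'.2.1.count true)
            = rest.length + ((n+1).toNat - vis.count true) := c7
        omega
      obtain ⟨d1, d2, d3, d4⟩ := ih st'.1 st'.2.1 st'.2.2 hq' c1 c2 hmk' hci' hfuel'
      exact ⟨d1, d2, fun k hk => d3 k (c3 k hk), d4⟩

theorem bfold_min (n : Int) (row : List Int) (hn : 0 ≤ n) (hrow : ∀ b ∈ row, InR n b)
    (t : List Bool) (hrt : ∀ b ∈ row, Mk t (wIdx (n+1).toNat b)) :
    ∀ st : List Int × List Bool × Int,
      st.2.1.length = (n+1).toNat → LeB st.2.1 t → (∀ x ∈ st.1, Mk t (wIdx (n+1).toNat x)) →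
      LeB (row.foldl bstep st).2.1 t ∧
      (∀ x ∈ (row.foldl bstep st).1, Mk t (wIdx (n+1).toNat x)) ∧
      (row.foldl bstep st).2.1.length = (n+1).toNat ∧
      (∀ x ∈ (row.foldl bstep st).1, x ∈ st.1 ∨ x ∈ row) := by
  induction row with
  | nil => intro st hl h1 h2; exact ⟨h1, h2, hl, fun x hx => Or.inl hx⟩
  | cons b row ih =>
    intro st hlen h1 h2
    have hb : InR n b := hrow b (by simp)
    have hrow' : ∀ x ∈ row, InR n x := fun x hx => hrow x (by simp [hx])
    have hrt' : ∀ x ∈ row, Mk t (wIdx (n+1).toNat x) := fun x hx => hrt x (by simp [hx])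
    rw [List.foldl_cons]
    by_cases hg : PySem.List.pyGetD st.2.1 b false = true
    · have hs : bstep st b = st := by unfold bstep; rw [hg]; simp
      rw [hs]
      obtain ⟨d1, d2, d3, d4⟩ := ih hrow' hrt' st hlen h1 h2
      refine ⟨d1, d2, d3, fun x hx => ?_⟩
      rcases d4 x hx with h | h
      · exact Or.inl h
      · exact Or.inr (by simp [h])
    · have hgb : PySem.List.pyGetD st.2.1 b false = false := Bool.eq_false_iff.mpr hg
      have hs : bstep st b =
          (st.1 ++ [b], st.2.1.set (wIdx (n+1).toNat b) true, st.2.2 + 1) := by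
        unfold bstep
        rw [hgb, setD_bridge n st.2.1 b true hn hb hlen]
        simp
      rw [hs]
      obtain ⟨d1, d2, d3, d4⟩ := ih hrow' hrt'
        (st.1 ++ [b], st.2.1.set (wIdx (n+1).toNat b) true, st.2.2 + 1)
        (by simpa using hlen)
        (by
          intro k hk
          rw [Mk, getD_set] at hk
          by_cases hc : wIdx (n+1).toNat b = k ∧ wIdx (n+1).toNat b < st.2.1.length
          · rw [if_pos hc] at hk
            rw [← hc.1]
            exact hrt b (by simp)
          · rw [if_neg hc] at hk
            exact h1 k hk)
        (by
          intro x hx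
          rcases List.mem_append.mp hx with h | h
          · exact h2 x h
          · simp at h
            rw [h]
            exact hrt b (by simp))
      refine ⟨d1, d2, d3, fun x hx => ?_⟩
      rcases d4 x hx with h | h
      · rcases List.mem_append.mp h with h' | h'
        · exact Or.inl h'
        · simp at h'; exact Or.inr (by simp [h'])
      · exact Or.inr (by simp [h])

theorem bfs_min (n : Int) (m : List (List Int)) (hn : 0 ≤ n)
    (hm : m.length = (n+1).toNat) (hEnt : ∀ (k : Nat), ∀ b ∈ m.getD k [], InR n b) :
    ∀ (fuel : Nat) (q : List Int) (vis : List Bool) (cnt : Int) (t : List Bool),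
      (∀ x ∈ q, InR n x) → vis.length = (n+1).toNat →
      LeB vis t → (∀ x ∈ q, Mk t (wIdx (n+1).toNat x)) → GoodRow n m t →
      LeB (bfsLoopV m fuel q vis cnt).1 t := by
  intro fuel
  induction fuel with
  | zero => intro q vis cnt t _ _ h1 _ _; exact h1
  | succ fuel ih =>
    intro q vis cnt t hq hlen h1 h2 hg
    cases q with
    | nil => exact h1
    | cons tw rest =>
      have htw : InR n tw := hq tw (by simp)
      have hrowe : PySem.List.pyGetD m tw [] = m.getD (wIdx (n+1).toNat tw) [] :=
        getD_bridge n m tw [] hn htw hm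
      have hrowIn : ∀ b ∈ PySem.List.pyGetD m tw [], InR n b := by
        rw [hrowe]; exact hEnt _
      have hrt : ∀ b ∈ PySem.List.pyGetD m tw [], Mk t (wIdx (n+1).toNat b) := by
        rw [hrowe]
        exact hg _ (wIdx_lt n tw hn htw) (h2 tw (by simp))
      simp only [bfsLoopV, bstep_eq]
      obtain ⟨d1, d2, d3, d4⟩ :=
        bfold_min n (PySem.List.pyGetD m tw []) hn hrowIn t hrt (rest, vis, cnt) hlen h1
          (fun x hx => h2 x (by simp [hx]))
      apply ih _ _ _ t _ d3 d1 d2 hg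
      intro x hx
      rcases d4 x hx with h | h
      · exact hq x (by simp [h])
      · exact hrowIn x h

def stepB (skip j : Int) (ab : Int × Int) (st : List Bool × Int × Bool) : List Bool × Int × Bool :=
  if j = skip then st
  else
    let st1 := if PySem.List.pyGetD st.1 ab.1 false && !(PySem.List.pyGetD st.1 ab.2 false)
               then (PySem.List.pySetD st.1 ab.2 true, st.2.1 + 1, true) else st
    if PySem.List.pyGetD st1.1 ab.2 false && !(PySem.List.pyGetD st1.1 ab.1 false)
    then (PySem.List.pySetD st1.1 ab.1 true, st1.2.1 + 1, true) else st1

def scanE (skip : Int) : List (Int × (Int × Int)) → (List Bool × Int × Bool) → (List Bool × Int × Bool)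
  | [], st => st
  | p :: rest, st => scanE skip rest (stepB skip p.1 p.2 st)

def compRoundsV (wires : List (Int × Int)) (skip : Int) : Nat → List Bool → Int → (List Bool × Int)
  | 0, reach, cnt => (reach, cnt)
  | fuel+1, reach, cnt =>
    let st := relaxScan wires skip reach cnt
    if st.2.2 then compRoundsV wires skip fuel st.1 st.2.1 else (st.1, st.2.1)

theorem scanE_eq_foldl (skip : Int) (l : List (Int × (Int × Int))) :
    ∀ st, scanE skip l st = l.foldl (fun st p => stepB skip p.1 p.2 st) st := by
  induction l with
  | nil => intro st; rfl
  | cons p rest ih => intro st; simp only [scanE, List.foldl_cons]; exact ih _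

theorem relaxScan_eq_scanE (wires : List (Int × Int)) (skip : Int) (reach : List Bool) (cnt : Int) :
    relaxScan wires skip reach cnt = scanE skip (PySem.List.enumerate wires 0) (reach, cnt, false) := by
  rw [scanE_eq_foldl, PySem.List.enumerate_eq_map_pyRange wires ((0 : Int), (0 : Int)),
    List.foldl_map]
  rfl

theorem compRounds_eq_V (wires : List (Int × Int)) (skip : Int) (fuel : Nat) :
    ∀ (reach : List Bool) (cnt : Int),
      compRounds wires skip fuel reach cnt = (compRoundsV wires skip fuel reach cnt).2 := by
  induction fuel with
  | zero => intro reach cnt; rfl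
  | succ fuel ih =>
    intro reach cnt
    simp only [compRounds, compRoundsV]
    split
    · exact ih _ _
    · rfl

theorem step_facts (n : Int) (skip j : Int) (ab : Int × Int) (hn : 0 ≤ n)
    (ha : InR n ab.1) (hb : InR n ab.2) :
    ∀ st : List Bool × Int × Bool, st.1.length = (n+1).toNat → st.2.1 = (st.1.count true : Int) →
    (stepB skip j ab st).1.length = (n+1).toNat ∧
    (stepB skip j ab st).2.1 = ((stepB skip j ab st).1.count true : Int) ∧
    LeB st.1 (stepB skip j ab st).1 ∧
    (st.2.2 = true → (stepB skip j ab st).2.2 = true) ∧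
    ((stepB skip j ab st).2.2 = false → stepB skip j ab st = st ∧ (j ≠ skip →
        (Mk st.1 (wIdx (n+1).toNat ab.1) ↔ Mk st.1 (wIdx (n+1).toNat ab.2)))) ∧
    ((stepB skip j ab st).2.2 = true → st.2.2 = false →
        st.1.count true < (stepB skip j ab st).1.count true) ∧
    (∀ t : List Bool, LeB st.1 t →
      (j ≠ skip → (Mk t (wIdx (n+1).toNat ab.1) ↔ Mk t (wIdx (n+1).toNat ab.2))) →
      LeB (stepB skip j ab st).1 t) := by
  intro st hlen hcnt
  have hwa := wIdx_lt n ab.1 hn ha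
  have hwb := wIdx_lt n ab.2 hn hb
  have hwa' : wIdx (n+1).toNat ab.1 < st.1.length := by omega
  have hwb' : wIdx (n+1).toNat ab.2 < st.1.length := by omega
  have hga := getD_bridge n st.1 ab.1 false hn ha hlen
  have hgb := getD_bridge n st.1 ab.2 false hn hb hlen
  have hsa := setD_bridge n st.1 ab.1 true hn ha hlen
  have hsb := setD_bridge n st.1 ab.2 true hn hb hlen
  have hvaE : ∀ v, st.1.getD (wIdx (n+1).toNat ab.1) false = v →
      st.1[wIdx (n+1).toNat ab.1]?.getD false = v := by
    intro v hv; rw [← List.getD_eq_getElem?_getD]; exact hv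
  have hvbE : ∀ v, st.1.getD (wIdx (n+1).toNat ab.2) false = v →
      st.1[wIdx (n+1).toNat ab.2]?.getD false = v := by
    intro v hv; rw [← List.getD_eq_getElem?_getD]; exact hv
  by_cases hj : j = skip
  · have hs : stepB skip j ab st = st := by unfold stepB; rw [if_pos hj]
    rw [hs]
    exact ⟨hlen, hcnt, fun k h => h, fun h => h,
      fun _ => ⟨rfl, fun hne => absurd hj hne⟩,
      fun h1 h2 => absurd (h1 ▸ h2) (by simp [h1]), fun t h1 _ => h1⟩
  · cases hva : st.1.getD (wIdx (n+1).toNat ab.1) false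
    · cases hvb : st.1.getD (wIdx (n+1).toNat ab.2) false
      · -- both false: nothing happens
        have hs : stepB skip j ab st = st := by
          unfold stepB
          rw [if_neg hj]
          simp [hga, hgb, hva, hvb, hvaE _ hva, hvbE _ hvb]
        rw [hs]
        exact ⟨hlen, hcnt, fun k h => h, fun h => h,
          fun _ => ⟨rfl, fun _ => by rw [Mk, Mk, hva, hvb]⟩,
          fun h1 h2 => absurd (h1 ▸ h2) (by simp [h1]), fun t h1 _ => h1⟩
      · -- a false, b true: second branch fires
        have hs : stepB skip j ab st =
            (st.1.set (wIdx (n+1).toNat ab.1) true, st.2.1 + 1, true) := by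
          unfold stepB
          rw [if_neg hj]
          simp [hga, hgb, hva, hvb, hvaE false hva, hvbE true hvb, hsa]
        rw [hs]
        have hc := count_set_true st.1 _ hwa' hva
        refine ⟨by simpa using hlen,
          by show st.2.1 + 1 = _; rw [hc, hcnt]; push_cast; ring, ?_, fun _ => rfl,
          by simp, ?_, ?_⟩
        · intro k hk
          rw [Mk, getD_set]
          split
          · rfl
          · exact hk
        · intro _ _
          show st.1.count true < (st.1.set (wIdx (n+1).toNat ab.1) true).count true
          rw [hc]; omega
        · intro t hle hiff
          intro k hk
          rw [Mk, getD_set] at hk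
          by_cases hcnd : wIdx (n+1).toNat ab.1 = k ∧ wIdx (n+1).toNat ab.1 < st.1.length
          · rw [if_pos hcnd] at hk
            rw [← hcnd.1]
            exact (hiff hj).mpr (hle _ (by rw [Mk, hvb]))
          · rw [if_neg hcnd] at hk
            exact hle k hk
    · cases hvb : st.1.getD (wIdx (n+1).toNat ab.2) false
      · -- a true, b false: first branch fires, second then cannot
        have hlen1 : (st.1.set (wIdx (n+1).toNat ab.2) true).length = (n+1).toNat := by
          simpa using hlen
        have h2a := getD_bridge n (st.1.set (wIdx (n+1).toNat ab.2) true) ab.1 false hn ha hlen1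
        have h2b := getD_bridge n (st.1.set (wIdx (n+1).toNat ab.2) true) ab.2 false hn hb hlen1
        have h2a' : (st.1.set (wIdx (n+1).toNat ab.2) true).getD (wIdx (n+1).toNat ab.1) false = true := by
          rw [getD_set]
          split
          · rfl
          · exact hva
        have h2b' : (st.1.set (wIdx (n+1).toNat ab.2) true).getD (wIdx (n+1).toNat ab.2) false = true := by
          rw [getD_set]
          rw [if_pos ⟨rfl, hwb'⟩]
        have h2ae : (st.1.set (wIdx (n+1).toNat ab.2) true)[wIdx (n+1).toNat ab.1]?.getD false = true := by
          rw [← List.getD_eq_getElem?_getD]; exact h2a'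
        have h2be : (st.1.set (wIdx (n+1).toNat ab.2) true)[wIdx (n+1).toNat ab.2]?.getD false = true := by
          rw [← List.getD_eq_getElem?_getD]; exact h2b'
        have hs : stepB skip j ab st =
            (st.1.set (wIdx (n+1).toNat ab.2) true, st.2.1 + 1, true) := by
          unfold stepB
          rw [if_neg hj]
          simp [hga, hgb, hva, hvb, hvaE true hva, hvbE false hvb, hsb, h2a, h2b, h2ae, h2be, h2a', h2b']
        rw [hs]
        have hc := count_set_true st.1 _ hwb' hvb
        refine ⟨by simpa using hlen,
          by show st.2.1 + 1 = _; rw [hc, hcnt]; push_cast; ring, ?_, fun _ => rfl,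
          by simp, ?_, ?_⟩
        · intro k hk
          rw [Mk, getD_set]
          split
          · rfl
          · exact hk
        · intro _ _
          show st.1.count true < (st.1.set (wIdx (n+1).toNat ab.2) true).count true
          rw [hc]; omega
        · intro t hle hiff
          intro k hk
          rw [Mk, getD_set] at hk
          by_cases hcnd : wIdx (n+1).toNat ab.2 = k ∧ wIdx (n+1).toNat ab.2 < st.1.length
          · rw [if_pos hcnd] at hk
            rw [← hcnd.1]
            exact (hiff hj).mp (hle _ (by rw [Mk, hva]))
          · rw [if_neg hcnd] at hk
            exact hle k hk
      · -- both true: nothing happens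
        have hs : stepB skip j ab st = st := by
          unfold stepB
          rw [if_neg hj]
          simp [hga, hgb, hva, hvb, hvaE _ hva, hvbE _ hvb]
        rw [hs]
        exact ⟨hlen, hcnt, fun k h => h, fun h => h,
          fun _ => ⟨rfl, fun _ => by rw [Mk, Mk, hva, hvb]⟩,
          fun h1 h2 => absurd (h1 ▸ h2) (by simp [h1]), fun t h1 _ => h1⟩
def WFenum (wires : List (Int × Int)) (l : List (Int × (Int × Int))) : Prop :=
  ∀ p ∈ l, ∃ (k : Nat) (hk : k < wires.length), p.1 = (k : Int) ∧ p.2 = wires[k]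

theorem enum_wf (wires : List (Int × Int)) : WFenum wires (PySem.List.enumerate wires 0) := by
  intro p hp
  obtain ⟨k, hk, he⟩ := (PySem.List.mem_enumerate_iff wires 0 p).mp hp
  exact ⟨k, hk, by simp [he], by simp [he]⟩

theorem enum_mem (wires : List (Int × Int)) (j : Nat) (hj : j < wires.length) :
    ((j : Int), wires[j]) ∈ PySem.List.enumerate wires 0 := by
  rw [PySem.List.mem_enumerate_iff]
  exact ⟨j, hj, by simp⟩

theorem scan_facts (n : Int) (wires : List (Int × Int)) (skip : Int) (hn : 0 ≤ n)
    (hP : ∀ p ∈ wires, InR n p.1 ∧ InR n p.2) :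
    ∀ (l : List (Int × (Int × Int))), WFenum wires l →
    ∀ st : List Bool × Int × Bool, st.1.length = (n+1).toNat → st.2.1 = (st.1.count true : Int) →
    (scanE skip l st).1.length = (n+1).toNat ∧
    (scanE skip l st).2.1 = ((scanE skip l st).1.count true : Int) ∧
    LeB st.1 (scanE skip l st).1 ∧
    (st.2.2 = true → (scanE skip l st).2.2 = true) ∧
    ((scanE skip l st).2.2 = false → (scanE skip l st).1 = st.1 ∧ (∀ p ∈ l, p.1 ≠ skip →
        (Mk st.1 (wIdx (n+1).toNat p.2.1) ↔ Mk st.1 (wIdx (n+1).toNat p.2.2)))) ∧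
    ((scanE skip l st).2.2 = true → st.2.2 = false →
        st.1.count true < (scanE skip l st).1.count true) ∧
    (∀ t : List Bool, LeB st.1 t →
      (∀ p ∈ l, p.1 ≠ skip → (Mk t (wIdx (n+1).toNat p.2.1) ↔ Mk t (wIdx (n+1).toNat p.2.2))) →
      LeB (scanE skip l st).1 t) := by
  intro l
  induction l with
  | nil =>
    intro _ st h1 h2
    exact ⟨h1, h2, fun k h => h, fun h => h, fun _ => ⟨rfl, by simp⟩,
      fun ha hb => absurd (ha ▸ hb) (by simp [ha]), fun t h1 _ => h1⟩
  | cons p rest ih =>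
    intro hwf st h1 h2
    obtain ⟨k, hk, hpj, hpe⟩ := hwf p (by simp)
    obtain ⟨hia, hib⟩ := hP wires[k] (wires.getElem_mem hk)
    have ha : InR n p.2.1 := by rw [hpe]; exact hia
    have hb : InR n p.2.2 := by rw [hpe]; exact hib
    obtain ⟨s1, s2, s3, s4, s5, s6, s7⟩ := step_facts n skip p.1 p.2 hn ha hb st h1 h2
    have hwf' : WFenum wires rest := fun q hq => hwf q (by simp [hq])
    obtain ⟨i1, i2, i3, i4, i5, i6, i7⟩ := ih hwf' (stepB skip p.1 p.2 st) s1 s2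
    show (scanE skip (p :: rest) st).1.length = (n+1).toNat ∧ _
    simp only [scanE]
    refine ⟨i1, i2, fun kk hkk => i3 kk (s3 kk hkk), fun hc => i4 (s4 hc), ?_, ?_, ?_⟩
    · intro hf
      have hs1f : (stepB skip p.1 p.2 st).2.2 = false := by
        cases hc : (stepB skip p.1 p.2 st).2.2
        · rfl
        · exact absurd (i4 hc) (by simp [hf])
      obtain ⟨heq, hif⟩ := s5 hs1f
      obtain ⟨ieq, iif⟩ := i5 hf
      have hst1 : (stepB skip p.1 p.2 st).1 = st.1 := by rw [heq]
      rw [hst1] at ieq iif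
      refine ⟨ieq, ?_⟩
      intro q hq hqs
      rcases List.mem_cons.mp hq with rfl | hq'
      · exact hif hqs
      · exact iif q hq' hqs
    · intro htr hfa
      cases hc : (stepB skip p.1 p.2 st).2.2
      · obtain ⟨heq, _⟩ := s5 hc
        have hst1 : (stepB skip p.1 p.2 st).1 = st.1 := by rw [heq]
        have hres := i6 htr hc
        rw [hst1] at hres
        exact hres
      · have hlt := s6 hc hfa
        have hle := tc_mono (stepB skip p.1 p.2 st).1 (scanE skip rest (stepB skip p.1 p.2 st)).1
          (by omega) i3
        omega
    · intro t hle hiffs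
      apply i7 t
      · exact s7 t hle (fun hqs => hiffs p (by simp) hqs)
      · intro q hq hqs
        exact hiffs q (by simp [hq]) hqs

theorem roundsV_facts (n : Int) (wires : List (Int × Int)) (skip : Int) (hn : 0 ≤ n)
    (hP : ∀ p ∈ wires, InR n p.1 ∧ InR n p.2) :
    ∀ (fuel : Nat) (reach : List Bool) (cnt : Int),
      reach.length = (n+1).toNat → cnt = (reach.count true : Int) →
    (compRoundsV wires skip fuel reach cnt).1.length = (n+1).toNat ∧
    (compRoundsV wires skip fuel reach cnt).2 = ((compRoundsV wires skip fuel reach cnt).1.count true : Int) ∧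
    LeB reach (compRoundsV wires skip fuel reach cnt).1 := by
  intro fuel
  induction fuel with
  | zero => intro reach cnt h1 h2; exact ⟨h1, h2, fun k h => h⟩
  | succ fuel ih =>
    intro reach cnt h1 h2
    simp only [compRoundsV, relaxScan_eq_scanE]
    obtain ⟨s1, s2, s3, s4, s5, s6, s7⟩ := scan_facts n wires skip hn hP
      (PySem.List.enumerate wires 0) (enum_wf wires) (reach, cnt, false) h1 h2
    split
    · obtain ⟨j1, j2, j3⟩ := ih _ _ s1 s2
      exact ⟨j1, j2, fun k hk => j3 k (s3 k hk)⟩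
    · exact ⟨s1, s2, s3⟩

theorem roundsV_closed (n : Int) (wires : List (Int × Int)) (i : Nat) (hn : 0 ≤ n)
    (hP : ∀ p ∈ wires, InR n p.1 ∧ InR n p.2) :
    ∀ (fuel : Nat) (reach : List Bool) (cnt : Int),
      reach.length = (n+1).toNat → cnt = (reach.count true : Int) →
      (n+1).toNat < reach.count true + fuel →
    GoodW n wires (i : Int) (compRoundsV wires (i : Int) fuel reach cnt).1 := by
  intro fuel
  induction fuel with
  | zero =>
    intro reach cnt h1 h2 hf
    have := tc_le reach
    omega
  | succ fuel ih =>
    intro reach cnt h1 h2 hf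
    simp only [compRoundsV, relaxScan_eq_scanE]
    obtain ⟨s1, s2, s3, s4, s5, s6, s7⟩ := scan_facts n wires (i : Int) hn hP
      (PySem.List.enumerate wires 0) (enum_wf wires) (reach, cnt, false) h1 h2
    split
    · rename_i hch
      apply ih _ _ s1 s2
      have hlt : reach.count true <
          (scanE (i : Int) (PySem.List.enumerate wires 0) (reach, cnt, false)).1.count true :=
        s6 hch rfl
      omega
    · rename_i hch
      have hf : (scanE (i : Int) (PySem.List.enumerate wires 0) (reach, cnt, false)).2.2 = false := by
        cases hc : (scanE (i : Int) (PySem.List.enumerate wires 0) (reach, cnt, false)).2.2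
        · rfl
        · exact absurd hc hch
      obtain ⟨heq, hiffs⟩ := s5 hf
      intro j hj hne
      show Mk (scanE (i : Int) (PySem.List.enumerate wires 0) (reach, cnt, false)).1 _ ↔ _
      rw [heq]
      exact hiffs ((j : Int), wires[j]) (enum_mem wires j hj) hne

theorem roundsV_min (n : Int) (wires : List (Int × Int)) (skip : Int) (hn : 0 ≤ n)
    (hP : ∀ p ∈ wires, InR n p.1 ∧ InR n p.2) :
    ∀ (fuel : Nat) (reach : List Bool) (cnt : Int) (t : List Bool),
      reach.length = (n+1).toNat → cnt = (reach.count true : Int) →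
      LeB reach t → GoodW n wires skip t →
      LeB (compRoundsV wires skip fuel reach cnt).1 t := by
  intro fuel
  induction fuel with
  | zero => intro reach cnt t _ _ h1 _; exact h1
  | succ fuel ih =>
    intro reach cnt t h1 h2 hle hg
    simp only [compRoundsV, relaxScan_eq_scanE]
    obtain ⟨s1, s2, s3, s4, s5, s6, s7⟩ := scan_facts n wires skip hn hP
      (PySem.List.enumerate wires 0) (enum_wf wires) (reach, cnt, false) h1 h2
    have hiffs : ∀ p ∈ PySem.List.enumerate wires 0, p.1 ≠ skip →
        (Mk t (wIdx (n+1).toNat p.2.1) ↔ Mk t (wIdx (n+1).toNat p.2.2)) := by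
      intro p hp hps
      obtain ⟨k, hk, hpj, hpe⟩ := enum_wf wires p hp
      have := hg k hk (by rw [← hpj]; exact hps)
      rw [hpe]
      exact this
    split
    · exact ih _ _ t s1 s2 (s7 t hle hiffs) hg
    · exact s7 t hle hiffs
theorem per_edge (n : Int) (wires : List (Int × Int)) (i : Nat) (m2 : List (List Int))
    (hn : 0 ≤ n) (hi : i < wires.length) (hP : ∀ p ∈ wires, InR n p.1 ∧ InR n p.2)
    (hlen : m2.length = (n+1).toNat) (hR : RowsOf n wires i m2)
    (s : Int) (hs : InR n s) :
    countTower m2 s n = comp n wires (i : Int) s := by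
  have hw := wIdx_lt n s hn hs
  have hrep : (List.replicate (n+1).toNat false).length = (n+1).toNat := by simp
  have hvis0 : PySem.List.pySetD (List.replicate (n+1).toNat false) s true
      = (List.replicate (n+1).toNat false).set (wIdx (n+1).toNat s) true :=
    setD_bridge n _ s true hn hs hrep
  set vis0 := (List.replicate (n+1).toNat false).set (wIdx (n+1).toNat s) true with hv0
  have hlen0 : vis0.length = (n+1).toNat := by simp [hv0]
  have htc0 : vis0.count true = 1 := by
    rw [hv0, count_set_true _ _ (by omega) (getD_replicate _ _)]
    simp [List.count_replicate]
  have hmk0 : Mk vis0 (wIdx (n+1).toNat s) := by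
    rw [Mk, hv0, getD_set, if_pos ⟨rfl, by omega⟩]
  have hEnt : ∀ (k : Nat), ∀ b ∈ m2.getD k [], InR n b := rows_ent n wires i m2 hP hR
  -- A side
  have hfuel : (1 : Nat) + ((n+1).toNat - vis0.count true) ≤ (n+2).toNat := by
    rw [htc0]; omega
  obtain ⟨a1, a2, a3, a4⟩ := bfs_main n m2 hn hlen hEnt (n+2).toNat [s] vis0 1
    (by intro x hx; simp at hx; rw [hx]; exact hs) hlen0 (by rw [htc0]; rfl)
    (by intro x hx; simp at hx; rw [hx]; exact hmk0)
    (by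
      intro k hk hmkk
      rw [Mk, hv0, getD_set] at hmkk
      by_cases hc : wIdx (n+1).toNat s = k ∧ wIdx (n+1).toNat s < (List.replicate (n+1).toNat false).length
      · exact Or.inl ⟨s, by simp, hs, hc.1⟩
      · rw [if_neg hc, getD_replicate] at hmkk
        exact absurd hmkk (by simp))
    (by simpa using hfuel)
  -- B side
  obtain ⟨b1, b2, b3⟩ := roundsV_facts n wires (i : Int) hn hP (n+1).toNat vis0 1
    hlen0 (by rw [htc0]; rfl)
  have hgB : GoodW n wires (i : Int) (compRoundsV wires (i : Int) (n+1).toNat vis0 1).1 :=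
    roundsV_closed n wires i hn hP (n+1).toNat vis0 1 hlen0 (by rw [htc0]; rfl)
      (by rw [htc0]; omega)
  -- cross inclusions
  have hAB : LeB (bfsLoopV m2 (n+2).toNat [s] vis0 1).1
      (compRoundsV wires (i : Int) (n+1).toNat vis0 1).1 :=
    bfs_min n m2 hn hlen hEnt (n+2).toNat [s] vis0 1 _
      (by intro x hx; simp at hx; rw [hx]; exact hs) hlen0 b3
      (by intro x hx; simp at hx; rw [hx]; exact b3 _ hmk0)
      (goodRow_of_goodW n wires i m2 hR _ hgB)
  have hBA : LeB (compRoundsV wires (i : Int) (n+1).toNat vis0 1).1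
      (bfsLoopV m2 (n+2).toNat [s] vis0 1).1 :=
    roundsV_min n wires (i : Int) hn hP (n+1).toNat vis0 1 _ hlen0 (by rw [htc0]; rfl) a3
      (goodW_of_goodRow n wires i m2 hn hP hR _ a4)
  have heqv : (bfsLoopV m2 (n+2).toNat [s] vis0 1).1
      = (compRoundsV wires (i : Int) (n+1).toNat vis0 1).1 :=
    eq_of_leb _ _ (by rw [a1, b1]) hAB hBA
  show bfsLoop m2 (n+2).toNat [s] (PySem.List.pySetD (List.replicate (n+1).toNat false) s true) 1
      = compRounds wires (i : Int) (n+1).toNat (PySem.List.pySetD (List.replicate (n+1).toNat false) s true) 1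
  rw [hvis0, bfsLoop_eq_V, compRounds_eq_V, a2, b2, heqv]

theorem outer_eq (n : Int) (wires : List (Int × Int)) (hn : 0 ≤ n)
    (hP : ∀ p ∈ wires, InR n p.1 ∧ InR n p.2) :
    ∀ (ws2 ws1 : List (Int × Int)) (m : List (List Int)) (ans : Int),
      wires = ws1 ++ ws2 → MInv n wires m →
      (ws2.foldl
        (fun (st : List (List Int) × Int) uv =>
          let m2 := pyDelValAt (pyDelValAt st.1 uv.1 uv.2) uv.2 uv.1
          let ans := min st.2 |countTower m2 uv.1 n - countTower m2 uv.2 n|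
          (pyAppendAt (pyAppendAt m2 uv.1 uv.2) uv.2 uv.1, ans))
        (m, ans)).2 =
      (PySem.List.pyRange (ws1.length : Int) (wires.length : Int) 1).foldl
        (fun best i =>
          let uv := PySem.List.pyGetD wires i (0, 0)
          min best |comp n wires i uv.1 - comp n wires i uv.2|)
        ans := by
  intro ws2
  induction ws2 with
  | nil =>
    intro ws1 m ans hw _
    rw [PySem.List.pyRange_one_eq_nil (by rw [hw]; simp)]
    rfl
  | cons uv rest ih =>
    intro ws1 m ans hw hm
    have hi : ws1.length < wires.length := by
      rw [hw, List.length_append, List.length_cons]; omega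
    have hwi : wires[ws1.length]'hi = uv := by
      have hopt : wires[ws1.length]? = some uv := by
        rw [hw, List.getElem?_append_right (by omega)]
        simp
      rw [List.getElem?_eq_getElem hi] at hopt
      exact Option.some.inj hopt
    have hget : PySem.List.pyGetD wires (ws1.length : Int) ((0:Int), (0:Int)) = uv := by
      unfold PySem.List.pyGetD
      rw [hw, PySem.List.pyGet?_append_length]
      rfl
    obtain ⟨hu, hv⟩ := hP uv (by rw [hw]; simp)
    obtain ⟨hm2len, hm2rows, hm3⟩ := mutate_facts n wires m ws1.length hn hi hP hm
    rw [hwi] at hm2len hm2rows hm3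
    have hcast : (wires.length : Int) - (ws1.length : Int) > 0 := by
      push_cast
      omega
    rw [PySem.List.pyRange_one_cons (by omega), List.foldl_cons, List.foldl_cons]
    have he1 : countTower (pyDelValAt (pyDelValAt m uv.1 uv.2) uv.2 uv.1) uv.1 n
        = comp n wires (ws1.length : Int) uv.1 := by
      have := per_edge n wires ws1.length (pyDelValAt (pyDelValAt m uv.1 uv.2) uv.2 uv.1)
        hn hi hP hm2len hm2rows uv.1 hu
      exact this
    have he2 : countTower (pyDelValAt (pyDelValAt m uv.1 uv.2) uv.2 uv.1) uv.2 n
        = comp n wires (ws1.length : Int) uv.2 := by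
      exact per_edge n wires ws1.length (pyDelValAt (pyDelValAt m uv.1 uv.2) uv.2 uv.1)
        hn hi hP hm2len hm2rows uv.2 hv
    have hrec := ih (ws1 ++ [uv])
      (pyAppendAt (pyAppendAt (pyDelValAt (pyDelValAt m uv.1 uv.2) uv.2 uv.1) uv.1 uv.2) uv.2 uv.1)
      (min ans |countTower (pyDelValAt (pyDelValAt m uv.1 uv.2) uv.2 uv.1) uv.1 n -
        countTower (pyDelValAt (pyDelValAt m uv.1 uv.2) uv.2 uv.1) uv.2 n|)
      (by rw [hw]; simp) hm3
    simp only at hrec ⊢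
    rw [hrec]
    have hlen1 : ((ws1 ++ [uv]).length : Int) = (ws1.length : Int) + 1 := by
      push_cast
      simp
    rw [hlen1, hget, he1, he2]
-- ===== VERDICT (by name: the statement is the Claim_ definition above) =====
theorem solution_spec : Claim_equal_solution := by
  intro n wires _ hpre
  show solution n wires = solution_alt n wires
  cases hwc : wires with
  | nil =>
    show (99999999 : Int) = _
    rw [solution_alt, PySem.List.pyRange_one_eq_nil (by simp)]
    rfl
  | cons p rest =>
    rw [← hwc]
    have hp := hpre p (by rw [hwc]; simp)
    have hn : 0 ≤ n := by omega
    have hP : ∀ q ∈ wires, InR n q.1 ∧ InR n q.2 := by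
      intro q hq
      have := hpre q hq
      exact ⟨⟨this.1, this.2.1⟩, ⟨this.2.2.1, this.2.2.2⟩⟩
    have hm0 := matrix0_facts n hn
    have hbuild := build_facts n wires hn hP _ hm0.1
    have hminv : MInv n wires
        (wires.foldl (fun m uv => pyAppendAt (pyAppendAt m uv.1 uv.2) uv.2 uv.1)
          ((PySem.List.pyRange 0 (n+1) 1).map (fun _ => ([] : List Int)))) := by
      refine ⟨hbuild.1, ?_⟩
      intro k b
      rw [hbuild.2 k b, hm0.2 k]
      simp
    have houter := outer_eq n wires hn hP wires [] _ 99999999 rfl hminv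
    show (wires.foldl _ (_, 99999999)).2 = _
    rw [houter, solution_alt]
    simp
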